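-- pv_equiv track=rewrite | github.com/petrzelk/pe-petrzelka | modules/project_euler_functions.py | is_lychrel
-- ===== SOURCE A (Python) =====
-- def is_palendromic(string: str) -> bool:
--   '''A simple test for palendromic strings
--   '''
--   return (string == string[::-1])
--
-- def is_lychrel(n: int, iterations=0) -> bool:
--   '''Lychel number test, assuming that 50 iterations is sufficient.
--   '''
--   n += int(str(n)[::-1])
--   if is_palendromic(str(n)):
--     return (False)
--   elif iterations >= 50:
--     return (True)
--   else:
--     return (is_lychrel(n, iterations + 1))
-- ===== SOURCE B (Python) =====
-- def is_lychrel(n: int, iterations=0) -> bool: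
--   '''Lychel number test, assuming that 50 iterations is sufficient.'''
--   for _ in range(max(0, 50 - iterations) + 1):
--     n += int(str(n)[::-1])
--     s = str(n)
--     if s == s[::-1]:
--       return False
--   return True
-- ===== Notes on version B (the rewrite author's own statement) =====
-- stated objective: simpler
-- what changed: Replaced the tail recursion with an inlined helper by a bounded for-loop over a precomputed iteration count (max(0, 50-iterations)+1), with the palindrome test inlined and True returned after the loop.
import Mathlib
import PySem

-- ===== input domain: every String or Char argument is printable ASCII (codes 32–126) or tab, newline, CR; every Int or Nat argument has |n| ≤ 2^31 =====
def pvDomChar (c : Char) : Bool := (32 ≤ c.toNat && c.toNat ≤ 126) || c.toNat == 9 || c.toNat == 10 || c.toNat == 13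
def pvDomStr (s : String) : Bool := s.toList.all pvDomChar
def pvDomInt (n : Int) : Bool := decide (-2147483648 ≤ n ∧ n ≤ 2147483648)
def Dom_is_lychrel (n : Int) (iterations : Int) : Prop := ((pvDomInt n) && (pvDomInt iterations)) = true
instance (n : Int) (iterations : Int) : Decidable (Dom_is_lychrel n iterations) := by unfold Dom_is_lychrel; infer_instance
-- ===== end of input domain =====

-- B replaces A's tail recursion (with its palindrome helper) by a bounded for-loop over a
-- precomputed iteration count, with the palindrome test inlined; same cost, plainer control flow.


-- ===== PORT A =====
-- helper: is_palendromic(string) = (string == string[::-1]); ported on List Char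
-- (s[::-1] on a string is reversal, PySem.Str.slice?_none_none_neg_one)
def is_palendromic (s : List Char) : Bool := s == s.reverse

-- int(str(n)[::-1]): none exactly where Python raises ValueError (n < 0)
def pvRevInt? (n : Int) : Option Int := PySem.Int.ofChars? (PySem.Int.toChars n).reverse

def is_lychrel (n : Int) (iterations : Int) : Bool :=
  match pvRevInt? n with
  | none => false  -- unreachable under Pre_: Python raises ValueError here
  | some r =>
    let m := n + r
    if is_palendromic (PySem.Int.toChars m) then false
    else if iterations ≥ 50 then true
    else is_lychrel m (iterations + 1)
termination_by (51 - iterations).toNat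
decreasing_by omega

-- ===== PORT B =====
-- the for-loop of Source B: fuel = number of remaining loop passes
def lychrel_loop : Nat → Int → Bool
  | 0, _ => true
  | fuel + 1, n =>
    match PySem.Int.ofChars? (PySem.Int.toChars n).reverse with
    | none => false  -- unreachable under Pre_: Python raises ValueError here
    | some r =>
      let m := n + r
      if PySem.Int.toChars m == (PySem.Int.toChars m).reverse then false
      else lychrel_loop fuel m

def is_lychrel_alt (n : Int) (iterations : Int) : Bool :=
  lychrel_loop ((max 0 (50 - iterations)).toNat + 1) n

-- ===== PRECONDITION & SPEC =====
-- Pre_ excludes n < 0, on which both Pythons raise ValueError (int('…-') from the reversed string).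
def Pre_is_lychrel (n : Int) (iterations : Int) : Prop := 0 ≤ n
instance (n : Int) (iterations : Int) : Decidable (Pre_is_lychrel n iterations) := by unfold Pre_is_lychrel; infer_instance
def pvWitness_is_lychrel : Int × Int := (196, 0)

def Spec_is_lychrel (n : Int) (iterations : Int) (out : Bool) : Prop := out = is_lychrel_alt n iterations
instance (n : Int) (iterations : Int) (out : Bool) : Decidable (Spec_is_lychrel n iterations out) := by unfold Spec_is_lychrel; infer_instance

-- ===== CLAIM (what is proved, stated in full; the proofs are below) =====
def Claim_equal_is_lychrel : Prop := ∀ (n : Int) (iterations : Int), Dom_is_lychrel n iterations → Pre_is_lychrel n iterations → Spec_is_lychrel n iterations (is_lychrel n iterations)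

-- ===== LEMMAS AND PROOFS =====

-- A's recursion with counter `it` equals B's loop with (50 - it).toNat + 1 remaining passes.
theorem is_lychrel_eq_loop (k : Nat) : ∀ (n iterations : Int),
    (50 - iterations).toNat = k → is_lychrel n iterations = lychrel_loop (k + 1) n := by
  induction k with
  | zero =>
    intro n it hk
    have h50 : it ≥ 50 := by omega
    rw [is_lychrel.eq_1, lychrel_loop]
    simp only [pvRevInt?, is_palendromic]
    cases hrev : PySem.Int.ofChars? (PySem.Int.toChars n).reverse with
    | none => rfl
    | some r =>
      by_cases hp : (PySem.Int.toChars (n + r) == (PySem.Int.toChars (n + r)).reverse) = true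
      · simp [hp]
      · simp [hp, h50, lychrel_loop]
  | succ k ih =>
    intro n it hk
    have hlt : ¬ it ≥ 50 := by omega
    rw [is_lychrel.eq_1, lychrel_loop]
    simp only [pvRevInt?, is_palendromic]
    cases hrev : PySem.Int.ofChars? (PySem.Int.toChars n).reverse with
    | none => rfl
    | some r =>
      by_cases hp : (PySem.Int.toChars (n + r) == (PySem.Int.toChars (n + r)).reverse) = true
      · simp [hp]
      · simp only [hp, if_false, Bool.false_eq_true, if_neg hlt]
        exact ih (n + r) (it + 1) (by omega)

-- ===== VERDICT (by name: the statement is the Claim_ definition above) =====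
theorem is_lychrel_spec : Claim_equal_is_lychrel := by
  intro n it _ _
  unfold Spec_is_lychrel is_lychrel_alt
  rw [is_lychrel_eq_loop ((50 - it).toNat) n it rfl]
  congr 1
  omega
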